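-- pv_equiv track=rewrite | github.com/kashifusmani/interview_prep | amazon/optimizing_box_weights.py | minimalHeaviestSetA
-- ===== SOURCE A (Python) =====
-- def minimalHeaviestSetA(arr):
--     result = []
--     sort = list(reversed(sorted(arr)))
--     sumA = 0
--     for i in range(0, len(sort)):
--         sumA += sort[i]
--         result.append(sort[i])
--         sumB = sum(sort[i+1:])
--         if sumA >= sumB:
--             break
--     return list(reversed(result))
-- ===== SOURCE B (Python) =====
-- def minimalHeaviestSetA(arr):
--     s = sorted(arr)
--     total = sum(s)
--     acc = 0
--     i = len(s)
--     while i > 0: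
--         i -= 1
--         acc += s[i]
--         if 2 * acc >= total:
--             break
--     return s[i:]
-- ===== Notes on version B (the rewrite author's own statement) =====
-- stated objective: faster
-- what changed: B sorts ascending once, precomputes the total sum and walks from the heavy end maintaining a running sum (condition 2*acc >= total), returning a suffix slice, instead of A's per-iteration sum(sort[i+1:]) rescan and list-building with two reversals.
import Mathlib
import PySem

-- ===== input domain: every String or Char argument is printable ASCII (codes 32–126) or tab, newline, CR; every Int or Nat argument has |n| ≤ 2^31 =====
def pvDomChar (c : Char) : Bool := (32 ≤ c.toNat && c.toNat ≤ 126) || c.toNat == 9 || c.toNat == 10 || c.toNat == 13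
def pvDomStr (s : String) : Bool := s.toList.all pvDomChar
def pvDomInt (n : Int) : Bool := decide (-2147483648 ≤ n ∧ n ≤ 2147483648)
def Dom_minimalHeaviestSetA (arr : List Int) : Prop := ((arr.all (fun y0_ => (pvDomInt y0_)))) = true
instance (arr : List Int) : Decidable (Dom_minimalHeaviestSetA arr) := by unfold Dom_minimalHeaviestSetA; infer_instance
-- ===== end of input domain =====

-- ===== PORT A =====
-- B replaces A's per-step sum(sort[i+1:]) rescan by a precomputed total and one backward running sum (objective: faster, asymptotic).
-- Port of A's loop: consumes the descending-sorted list element by element; sumB = rest.sum each step.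
def aLoop : List Int → Int → List Int → List Int
  | [], _, result => result.reverse
  | x :: rest, sumA, result =>
      let sumA' := sumA + x
      let result' := result ++ [x]
      let sumB := rest.sum
      if sumA' ≥ sumB then result'.reverse else aLoop rest sumA' result'

def minimalHeaviestSetA (arr : List Int) : List Int :=
  let sort := (PySem.List.sorted arr id).reverse
  aLoop sort 0 []

-- ===== PORT B =====
-- Port of B's `while i > 0` loop: i counts down from len(s); returns the final i.
def bLoop (s : List Int) (total : Int) : Nat → Int → Nat
  | 0, _ => 0
  | i + 1, acc =>
      let acc' := acc + s.getD i 0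
      if 2 * acc' ≥ total then i else bLoop s total i acc'

def minimalHeaviestSetA_alt (arr : List Int) : List Int :=
  let s := PySem.List.sorted arr id
  let total := s.sum
  let i := bLoop s total s.length 0
  s.drop i  -- s[i:] with 0 ≤ i ≤ len s: exact

-- ===== PRECONDITION & SPEC =====
def Spec_minimalHeaviestSetA (arr : List Int) (out : List Int) : Prop := out = minimalHeaviestSetA_alt arr
instance (arr : List Int) (out : List Int) : Decidable (Spec_minimalHeaviestSetA arr out) := by unfold Spec_minimalHeaviestSetA; infer_instance

-- ===== CLAIM (what is proved, stated in full; the proofs are below) =====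
def Claim_equal_minimalHeaviestSetA : Prop := ∀ (arr : List Int), Dom_minimalHeaviestSetA arr → Spec_minimalHeaviestSetA arr (minimalHeaviestSetA arr)

-- ===== LEMMAS AND PROOFS =====

-- Invariant linking A's forward consumption of s.reverse to B's countdown over s.
lemma loop_bridge (s : List Int) :
    ∀ (i : Nat), i ≤ s.length →
      aLoop (s.take i).reverse (s.drop i).sum (s.drop i).reverse
        = s.drop (bLoop s s.sum i (s.drop i).sum) := by
  intro i
  induction i with
  | zero => simp [aLoop, bLoop]
  | succ i ih =>
    intro hle
    have hi : i < s.length := by omega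
    have htake : (s.take (i + 1)).reverse = s[i] :: (s.take i).reverse := by
      rw [List.take_add_one, List.reverse_append]
      simp [hi]
    have hdrop : s.drop i = s[i] :: s.drop (i + 1) := List.drop_eq_getElem_cons hi
    have hgetD : s.getD i 0 = s[i] := List.getD_eq_getElem s 0 hi
    have hsum : (s.drop (i + 1)).sum + s[i] = (s.drop i).sum := by
      rw [hdrop, List.sum_cons]; omega
    have htotal : s.sum = (s.take i).sum + (s.drop i).sum := by
      conv_lhs => rw [← List.take_append_drop i s]
      simp
    have hres : (s.drop (i + 1)).reverse ++ [s[i]] = (s.drop i).reverse := by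
      rw [hdrop, List.reverse_cons]
    have hcond : ((s.drop i).sum ≥ (s.take i).sum) ↔ (2 * (s.drop i).sum ≥ s.sum) := by
      rw [htotal]; omega
    rw [htake]
    simp only [aLoop, bLoop, hgetD, List.sum_reverse, hsum, hres, List.reverse_reverse]
    by_cases h : 2 * (s.drop i).sum ≥ s.sum
    · rw [if_pos (hcond.mpr h), if_pos h]
    · rw [if_neg (fun hc => h (hcond.mp hc)), if_neg h]
      exact ih (by omega)

-- ===== VERDICT (by name: the statement is the Claim_ definition above) =====
theorem minimalHeaviestSetA_spec : Claim_equal_minimalHeaviestSetA := by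
  intro arr _
  unfold Spec_minimalHeaviestSetA minimalHeaviestSetA minimalHeaviestSetA_alt
  have h := loop_bridge (PySem.List.sorted arr id) (PySem.List.sorted arr id).length (le_refl _)
  rw [List.take_length, List.drop_length] at h
  simpa using h
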